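-- pv_equiv track=rewrite | github.com/Ismaril/mini_projects | pixelart/image_to_pixelart.py | convert_flattened_to_3_items
-- ===== SOURCE A (Python) =====
-- def convert_flattened_to_3_items(flattened):
--     """Convert flattened array back to 3 item object [[R,G,B], ... [R,G,B]]"""
--     result = []
--     rgb_container = []  # here are temporarily set RGB colors as one item
--     for item in flattened:
--         rgb_container.append(item)
--         if len(rgb_container) == 3:
--             result.append(rgb_container)
--             rgb_container = []
--     return result
-- ===== SOURCE B (Python) =====
-- def convert_flattened_to_3_items(flattened):
--     """Convert flattened array back to 3 item object [[R,G,B], ... [R,G,B]]"""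
--     return [list(t) for t in zip(*[iter(flattened)] * 3)]
-- ===== Notes on version B (the rewrite author's own statement) =====
-- stated objective: idiomatic
-- what changed: Replaces the explicit loop with a temporary RGB buffer by the standard zip-of-repeated-iterator grouper idiom, consuming the flat list three elements at a time with no accumulator.
import Mathlib
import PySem

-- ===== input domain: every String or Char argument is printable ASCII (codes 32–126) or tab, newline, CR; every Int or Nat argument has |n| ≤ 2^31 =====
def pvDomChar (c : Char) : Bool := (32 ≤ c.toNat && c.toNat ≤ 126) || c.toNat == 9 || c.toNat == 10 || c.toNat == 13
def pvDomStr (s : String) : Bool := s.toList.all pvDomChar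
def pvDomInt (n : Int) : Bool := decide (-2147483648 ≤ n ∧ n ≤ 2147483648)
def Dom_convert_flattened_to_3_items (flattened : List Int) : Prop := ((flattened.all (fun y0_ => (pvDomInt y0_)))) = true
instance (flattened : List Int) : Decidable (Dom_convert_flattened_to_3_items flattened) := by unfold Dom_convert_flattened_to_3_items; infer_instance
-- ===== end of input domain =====

-- B replaces A's running RGB buffer with the zip-grouper idiom (three-at-a-time consumption); idiomatic, same O(n) cost.


-- ===== PORT A =====
-- A: foldl carrying (result, rgb_container); flush container to result when it reaches length 3
def pvStepA (st : List (List Int) × List Int) (item : Int) : List (List Int) × List Int :=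
  let rgb := st.2 ++ [item]
  if rgb.length = 3 then (st.1 ++ [rgb], []) else (st.1, rgb)

def convert_flattened_to_3_items (flattened : List Int) : List (List Int) :=
  (flattened.foldl pvStepA ([], [])).1

-- ===== PORT B =====
-- B: zip-of-repeated-iterator grouper = take three elements at a time, drop incomplete tail
def convert_flattened_to_3_items_alt : List Int → List (List Int)
  | a :: b :: c :: rest => [a, b, c] :: convert_flattened_to_3_items_alt rest
  | _ => []

-- ===== PRECONDITION & SPEC =====
def Spec_convert_flattened_to_3_items (flattened : List Int) (out : List (List Int)) : Prop := out = convert_flattened_to_3_items_alt flattened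
instance (flattened : List Int) (out : List (List Int)) : Decidable (Spec_convert_flattened_to_3_items flattened out) := by unfold Spec_convert_flattened_to_3_items; infer_instance

-- ===== CLAIM (what is proved, stated in full; the proofs are below) =====
def Claim_equal_convert_flattened_to_3_items : Prop := ∀ (flattened : List Int), Dom_convert_flattened_to_3_items flattened → Spec_convert_flattened_to_3_items flattened (convert_flattened_to_3_items flattened)

-- ===== LEMMAS AND PROOFS =====

-- ===== VERDICT (by name: the statement is the Claim_ definition above) =====
theorem pv_fold_inv : ∀ (l : List Int) (acc : List (List Int)),
    (l.foldl pvStepA (acc, [])).1 = acc ++ convert_flattened_to_3_items_alt l := by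
  intro l
  induction l using convert_flattened_to_3_items_alt.induct with
  | case1 a b c rest ih =>
      intro acc
      simp only [convert_flattened_to_3_items_alt, List.foldl_cons]
      have h1 : pvStepA (acc, []) a = (acc, [a]) := by simp [pvStepA]
      have h2 : pvStepA (acc, [a]) b = (acc, [a, b]) := by simp [pvStepA]
      have h3 : pvStepA (acc, [a, b]) c = (acc ++ [[a, b, c]], []) := by simp [pvStepA]
      rw [h1, h2, h3, ih]
      simp
  | case2 l h =>
      intro acc
      match l with
      | [] => simp [convert_flattened_to_3_items_alt]
      | [a] => simp [convert_flattened_to_3_items_alt, List.foldl, pvStepA]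
      | [a, b] => simp [convert_flattened_to_3_items_alt, List.foldl, pvStepA]
      | a :: b :: c :: rest => exact absurd rfl (h a b c rest)

theorem convert_flattened_to_3_items_spec : Claim_equal_convert_flattened_to_3_items := by
  intro l _
  unfold Spec_convert_flattened_to_3_items convert_flattened_to_3_items
  simpa using pv_fold_inv l []
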